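-- pv_equiv track=rewrite | github.com/Mutahira213/Translation-Tool | Translation tool.py | check_start_stop_codons
-- ===== SOURCE A (Python) =====
-- CODON_TABLE = {
--     'UUU': 'F', 'UUC': 'F',
--     'UUA': 'L', 'UUG': 'L',
--     'CUU': 'L', 'CUC': 'L', 'CUA': 'L', 'CUG': 'L',
--     'UCU': 'S', 'UCC': 'S', 'UCA': 'S', 'UCG': 'S',
--     'AGU': 'S', 'AGC': 'S',
--     'UAU': 'Y', 'UAC': 'Y',
--     'UGU': 'C', 'UGC': 'C',
--     'UGG': 'W',
--     'CCU': 'P', 'CCC': 'P', 'CCA': 'P', 'CCG': 'P',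
--     'CAU': 'H', 'CAC': 'H',
--     'CAA': 'Q', 'CAG': 'Q',
--     'CGU': 'R', 'CGC': 'R', 'CGA': 'R', 'CGG': 'R',
--     'AGA': 'R', 'AGG': 'R',
--     'AUU': 'I', 'AUC': 'I', 'AUA': 'I',
--     'AUG': 'M',
--     'ACU': 'T', 'ACC': 'T', 'ACA': 'T', 'ACG': 'T',
--     'AAU': 'N', 'AAC': 'N',
--     'AAA': 'K', 'AAG': 'K',
--     'GUU': 'V', 'GUC': 'V', 'GUA': 'V', 'GUG': 'V',
--     'GCU': 'A', 'GCC': 'A', 'GCA': 'A', 'GCG': 'A',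
--     'GAU': 'D', 'GAC': 'D',
--     'GAA': 'E', 'GAG': 'E',
--     'GGU': 'G', 'GGC': 'G', 'GGA': 'G', 'GGG': 'G',
--     'UAA': '*', 'UAG': '*', 'UGA': '*',
-- }
--
-- def check_start_stop_codons(rna_sequence):
--     start_index = rna_sequence.find('AUG')
--     if start_index == -1:
--         return None, "No start codon (AUG) found in sequence."
--     coding_region = rna_sequence[start_index:]
--     found_stop = False
--     for i in range(0, len(coding_region) - 2, 3):
--         codon = coding_region[i:i+3]
--         if CODON_TABLE.get(codon) == '*':
--             found_stop = True
--             break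
--     if not found_stop:
--         return None, "No in-frame stop codon found."
--     return start_index, None
-- ===== SOURCE B (Python) =====
-- STOP_CODONS = ('UAA', 'UAG', 'UGA')
--
--
-- def check_start_stop_codons(rna_sequence):
--     start_index = rna_sequence.find('AUG')
--     if start_index == -1:
--         return None, "No start codon (AUG) found in sequence."
--     rest = rna_sequence[start_index:]
--     while len(rest) >= 3:
--         if rest[:3] in STOP_CODONS:
--             return start_index, None
--         rest = rest[3:]
--     return None, "No in-frame stop codon found."
-- ===== Notes on version B (the rewrite author's own statement) =====
-- stated objective: idiomatic
-- what changed: Replaces A's index loop over range(0, len-2, 3) with CODON_TABLE lookups and a found_stop flag by a codon-peeling while loop (rest = rest[3:]) that tests the codon's membership in the three stop codons directly and returns from inside the loop.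
import Mathlib
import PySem

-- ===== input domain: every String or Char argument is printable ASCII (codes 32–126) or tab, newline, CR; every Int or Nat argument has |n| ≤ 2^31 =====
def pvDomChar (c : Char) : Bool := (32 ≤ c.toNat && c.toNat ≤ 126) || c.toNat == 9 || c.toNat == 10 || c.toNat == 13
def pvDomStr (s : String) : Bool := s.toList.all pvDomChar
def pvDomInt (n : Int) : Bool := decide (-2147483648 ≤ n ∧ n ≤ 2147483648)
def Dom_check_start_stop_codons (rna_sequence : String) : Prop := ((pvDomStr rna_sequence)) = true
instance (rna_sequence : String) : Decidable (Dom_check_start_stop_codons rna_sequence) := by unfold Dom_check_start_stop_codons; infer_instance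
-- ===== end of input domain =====

-- B replaces A's index loop over range(0, len-2, 3) with CODON_TABLE lookups by a codon-peeling
-- while loop testing membership in the three stop codons directly (idiomatic; same cost).

-- ===== PORT A =====
-- the module-level dict literal CODON_TABLE, as its pair list plus PySem.Dict.ofList
def CODON_PAIRS : List (String × String) :=
  [("UUU", "F"), ("UUC", "F"),
   ("UUA", "L"), ("UUG", "L"),
   ("CUU", "L"), ("CUC", "L"), ("CUA", "L"), ("CUG", "L"),
   ("UCU", "S"), ("UCC", "S"), ("UCA", "S"), ("UCG", "S"),
   ("AGU", "S"), ("AGC", "S"),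
   ("UAU", "Y"), ("UAC", "Y"),
   ("UGU", "C"), ("UGC", "C"),
   ("UGG", "W"),
   ("CCU", "P"), ("CCC", "P"), ("CCA", "P"), ("CCG", "P"),
   ("CAU", "H"), ("CAC", "H"),
   ("CAA", "Q"), ("CAG", "Q"),
   ("CGU", "R"), ("CGC", "R"), ("CGA", "R"), ("CGG", "R"),
   ("AGA", "R"), ("AGG", "R"),
   ("AUU", "I"), ("AUC", "I"), ("AUA", "I"),
   ("AUG", "M"),
   ("ACU", "T"), ("ACC", "T"), ("ACA", "T"), ("ACG", "T"),
   ("AAU", "N"), ("AAC", "N"),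
   ("AAA", "K"), ("AAG", "K"),
   ("GUU", "V"), ("GUC", "V"), ("GUA", "V"), ("GUG", "V"),
   ("GCU", "A"), ("GCC", "A"), ("GCA", "A"), ("GCG", "A"),
   ("GAU", "D"), ("GAC", "D"),
   ("GAA", "E"), ("GAG", "E"),
   ("GGU", "G"), ("GGC", "G"), ("GGA", "G"), ("GGG", "G"),
   ("UAA", "*"), ("UAG", "*"), ("UGA", "*")]

def CODON_TABLE : PySem.Dict String String := PySem.Dict.ofList CODON_PAIRS

-- A's `for i in range(0, len(coding_region)-2, 3): … break` with the found_stop flag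
def aLoop (coding_region : String) : List Int → Bool
  | [] => false
  | i :: is =>
    let codon := PySem.Str.slice coding_region (some i) (some (i + 3))
    if CODON_TABLE.get? codon == some "*" then true
    else aLoop coding_region is

def check_start_stop_codons (rna_sequence : String) : Option Int × Option String :=
  let start_index := PySem.Str.find rna_sequence "AUG"
  if start_index == -1 then
    (none, some "No start codon (AUG) found in sequence.")
  else
    let coding_region := PySem.Str.slice rna_sequence (some start_index) none
    let found_stop :=
      aLoop coding_region (PySem.List.pyRange 0 (PySem.Str.len coding_region - 2) 3)
    if !found_stop then
      (none, some "No in-frame stop codon found.")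
    else
      (some start_index, none)

-- ===== PORT B =====
-- B's `while len(rest) >= 3: if rest[:3] in STOP_CODONS: return …; rest = rest[3:]`
-- (the string rest is carried as its character list; rest[:3] = take 3, rest[3:] = drop 3)
def bLoop (start_index : Int) (rest : List Char) : Option Int × Option String :=
  if _h : 3 ≤ rest.length then
    if rest.take 3 = "UAA".toList ∨ rest.take 3 = "UAG".toList ∨ rest.take 3 = "UGA".toList then
      (some start_index, none)
    else
      bLoop start_index (rest.drop 3)
  else
    (none, some "No in-frame stop codon found.")
termination_by rest.length
decreasing_by simp only [List.length_drop]; omega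

def check_start_stop_codons_alt (rna_sequence : String) : Option Int × Option String :=
  let start_index := PySem.Str.find rna_sequence "AUG"
  if start_index == -1 then
    (none, some "No start codon (AUG) found in sequence.")
  else
    bLoop start_index (PySem.Str.slice rna_sequence (some start_index) none).toList

-- ===== PRECONDITION & SPEC =====
def Spec_check_start_stop_codons (rna_sequence : String) (out : Option Int × Option String) : Prop := out = check_start_stop_codons_alt rna_sequence
instance (rna_sequence : String) (out : Option Int × Option String) : Decidable (Spec_check_start_stop_codons rna_sequence out) := by unfold Spec_check_start_stop_codons; infer_instance

-- ===== CLAIM (what is proved, stated in full; the proofs are below) =====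
def Claim_equal_check_start_stop_codons : Prop := ∀ (rna_sequence : String), Dom_check_start_stop_codons rna_sequence → Spec_check_start_stop_codons rna_sequence (check_start_stop_codons rna_sequence)

-- ===== LEMMAS AND PROOFS =====

-- A's found_stop flag as a function of the coding region
def aFound (s : String) : Bool :=
  aLoop s (PySem.List.pyRange 0 (PySem.Str.len s - 2) 3)

-- CODON_TABLE maps a string to '*' exactly when it is one of the three stop codons
set_option maxRecDepth 100000 in
lemma get?_eq_star_iff (s : String) :
    CODON_TABLE.get? s = some "*" ↔ (s = "UAA" ∨ s = "UAG" ∨ s = "UGA") := by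
  constructor
  · intro h
    have hmem : (s, "*") ∈ CODON_TABLE.items :=
      (PySem.Dict.get?_eq_some_iff_mem_items CODON_TABLE s "*" (by decide)).mp h
    have hitems : CODON_TABLE.items = CODON_PAIRS := by decide
    rw [hitems] at hmem
    simp only [CODON_PAIRS, List.mem_cons, List.not_mem_nil, or_false, Prod.mk.injEq] at hmem
    simp_all
  · rintro (rfl | rfl | rfl) <;> decide

lemma str_slice_eq (s : String) (a b : Nat) :
    PySem.Str.slice s (some (a : Int)) (some ((a : Int) + (b : Int)))
      = String.ofList ((s.toList.drop a).take b) := by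
  apply String.toList_inj.mp
  simp [PySem.Str.toList_slice, PySem.List.slice_natCast_add]

lemma drop3_cons (x y z : Char) (t : List Char) (k : Nat) :
    (x :: y :: z :: t).drop (k + 3) = t.drop k := by
  rw [show k + 3 = (k + 2) + 1 from rfl, List.drop_succ_cons,
      show k + 2 = (k + 1) + 1 from rfl, List.drop_succ_cons, List.drop_succ_cons]

lemma aLoop_shift (x y z : Char) (t : List Char) (ks : List Nat) :
    aLoop (String.ofList (x :: y :: z :: t)) (ks.map (fun (k : Nat) => ((k : Int) + 3)))
      = aLoop (String.ofList t) (ks.map (fun (k : Nat) => (k : Int))) := by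
  induction ks with
  | nil => rfl
  | cons k ks ih =>
    simp only [List.map_cons, aLoop]
    have hL : PySem.Str.slice (String.ofList (x :: y :: z :: t))
        (some ((k : Int) + 3)) (some ((k : Int) + 3 + 3))
        = String.ofList ((t.drop k).take 3) := by
      have h1 : ((k : Int) + 3) = ((k + 3 : Nat) : Int) := by push_cast; ring
      rw [h1, show (((k + 3 : Nat) : Int) + 3) = (((k + 3 : Nat) : Int) + ((3 : Nat) : Int))
            from by norm_num,
          str_slice_eq, String.toList_ofList, drop3_cons]
    have hR : PySem.Str.slice (String.ofList t) (some (k : Int)) (some ((k : Int) + 3))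
        = String.ofList ((t.drop k).take 3) := by
      rw [show ((k : Int) + 3) = (((k : Nat) : Int) + ((3 : Nat) : Int)) from by norm_num,
          str_slice_eq, String.toList_ofList]
    rw [hL, hR, ih]

lemma aFound_short (t : List Char) (h : t.length < 3) :
    aFound (String.ofList t) = false := by
  have hlen : PySem.Str.len (String.ofList t) = (t.length : Int) := by simp
  unfold aFound
  rw [hlen, PySem.List.pyRange_of_pos 0 _ (by norm_num : (0:Int) < 3)]
  rw [if_neg (by omega)]
  rfl

lemma count_eq (m : Nat) :
    (if (0:Int) < (m : Int) - 2
      then (((m : Int) - 2 - 0 + 3 - 1) / 3).toNat else 0) = m / 3 := by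
  split_ifs with hm
  · have h1 : ((m : Int) - 2 - 0 + 3 - 1) = (m : Int) := by ring
    rw [h1, show ((m : Int) / 3) = ((m / 3 : Nat) : Int) from
      (Nat.ToInt.div_congr rfl rfl).symm]
    omega
  · omega

lemma aFound_expand (m : Nat) (s : String) (hlen : PySem.Str.len s = (m : Int)) :
    aFound s = aLoop s ((List.range (m / 3)).map (fun (k : Nat) => (0:Int) + 3 * (k : Int))) := by
  unfold aFound
  rw [hlen, PySem.List.pyRange_of_pos ((0:Int)) _ (by norm_num : (0:Int) < 3), count_eq]

lemma aFound_cons3 (x y z : Char) (t : List Char) :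
    aFound (String.ofList (x :: y :: z :: t))
      = ((CODON_TABLE.get? (String.ofList [x, y, z]) == some "*")
          || aFound (String.ofList t)) := by
  have hlen : PySem.Str.len (String.ofList (x :: y :: z :: t)) = ((t.length + 3 : Nat) : Int) := by
    simp
    omega
  have hlen' : PySem.Str.len (String.ofList t) = ((t.length : Nat) : Int) := by simp
  rw [aFound_expand (t.length + 3) _ hlen, aFound_expand t.length _ hlen']
  have h33 : (t.length + 3) / 3 = t.length / 3 + 1 := by omega
  rw [h33, List.range_succ_eq_map, List.map_cons]
  simp only [aLoop]
  have hhead : PySem.Str.slice (String.ofList (x :: y :: z :: t))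
      (some ((0:Int) + 3 * ((0 : Nat) : Int))) (some ((0:Int) + 3 * ((0 : Nat) : Int) + 3))
      = String.ofList [x, y, z] := by
    rw [show ((0:Int) + 3 * ((0 : Nat) : Int)) = ((0 : Nat) : Int) from by norm_num,
        show (((0 : Nat) : Int) + 3) = (((0 : Nat) : Int) + ((3 : Nat) : Int)) from by norm_num,
        str_slice_eq, String.toList_ofList]
    rfl
  rw [hhead]
  by_cases hstop : CODON_TABLE.get? (String.ofList [x, y, z]) == some "*"
  · rw [if_pos hstop]; rw [hstop]; rfl
  · rw [if_neg hstop]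
    simp only [Bool.not_eq_true] at hstop
    rw [hstop, Bool.false_or]
    -- tail: shift the remaining indices by 3 onto the tail string
    have htail1 : (List.map (fun (k : Nat) => (0:Int) + 3 * (k : Int))
          (List.map Nat.succ (List.range (t.length / 3))))
        = ((List.range (t.length / 3)).map (fun k => 3 * k)).map
            (fun (k : Nat) => ((k : Int) + 3)) := by
      rw [List.map_map, List.map_map]
      apply List.map_congr_left
      intro k _
      simp only [Function.comp]
      push_cast
      ring
    have htail2 : ((List.range (t.length / 3)).map (fun k => 3 * k)).map
          (fun (k : Nat) => ((k : Int)))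
        = (List.range (t.length / 3)).map (fun (k : Nat) => (0:Int) + 3 * (k : Int)) := by
      rw [List.map_map]
      apply List.map_congr_left
      intro k _
      simp only [Function.comp]
      push_cast
      ring
    rw [htail1, aLoop_shift, htail2]

lemma ofList3_eq_iff (x y z : Char) (w : String) :
    String.ofList [x, y, z] = w ↔ [x, y, z] = w.toList := by
  constructor
  · intro h; rw [← h, String.toList_ofList]
  · intro h; apply String.toList_inj.mp; rw [String.toList_ofList, h]

lemma bLoop_eq (si : Int) (t : List Char) :
    bLoop si t = (if aFound (String.ofList t)
      then (some si, none)
      else (none, some "No in-frame stop codon found.")) := by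
  match t with
  | [] => rw [bLoop, aFound_short [] (by norm_num)]; norm_num
  | [x] => rw [bLoop, aFound_short [x] (by norm_num)]; norm_num
  | [x, y] => rw [bLoop, aFound_short [x, y] (by norm_num)]; norm_num
  | x :: y :: z :: t =>
    rw [aFound_cons3]
    rw [bLoop]
    rw [dif_pos (by norm_num : 3 ≤ (x :: y :: z :: t).length)]
    have htake : (x :: y :: z :: t).take 3 = [x, y, z] := rfl
    by_cases hstop : [x, y, z] = "UAA".toList ∨ [x, y, z] = "UAG".toList ∨ [x, y, z] = "UGA".toList
    · rw [if_pos (by rw [htake]; exact hstop)]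
      have hs : CODON_TABLE.get? (String.ofList [x, y, z]) = some "*" := by
        apply (get?_eq_star_iff _).mpr
        rcases hstop with h | h | h
        · exact Or.inl ((ofList3_eq_iff x y z "UAA").mpr h)
        · exact Or.inr (Or.inl ((ofList3_eq_iff x y z "UAG").mpr h))
        · exact Or.inr (Or.inr ((ofList3_eq_iff x y z "UGA").mpr h))
      rw [hs]
      rfl
    · rw [if_neg (by rw [htake]; exact hstop)]
      have hne : (CODON_TABLE.get? (String.ofList [x, y, z]) == some "*") = false := by
        apply beq_eq_false_iff_ne.mpr
        intro hc
        apply hstop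
        rcases (get?_eq_star_iff _).mp hc with h | h | h
        · exact Or.inl ((ofList3_eq_iff x y z "UAA").mp h)
        · exact Or.inr (Or.inl ((ofList3_eq_iff x y z "UAG").mp h))
        · exact Or.inr (Or.inr ((ofList3_eq_iff x y z "UGA").mp h))
      rw [hne, Bool.false_or]
      have hdrop : (x :: y :: z :: t).drop 3 = t := rfl
      rw [hdrop]
      exact bLoop_eq si t
termination_by t.length

-- ===== VERDICT (by name: the statement is the Claim_ definition above) =====
theorem check_start_stop_codons_spec : Claim_equal_check_start_stop_codons := by
  intro s _
  unfold Spec_check_start_stop_codons check_start_stop_codons check_start_stop_codons_alt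
  by_cases hfind : PySem.Str.find s "AUG" == -1
  · simp only [hfind, if_pos]
  · simp only [hfind]
    simp only [Bool.false_eq_true, if_false]
    have hb := bLoop_eq (PySem.Str.find s "AUG")
      (PySem.Str.slice s (some (PySem.Str.find s "AUG")) none).toList
    rw [String.ofList_toList] at hb
    rw [hb]
    set f := aFound (PySem.Str.slice s (some (PySem.Str.find s "AUG")) none) with hf
    unfold aFound at hf
    rw [← hf]
    cases f <;> rfl
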